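-- pv_equiv track=rewrite | github.com/kritishmohapatra/LEETCODE | 3818-minimum-prefix-removal-to-make-array-strictly-increasing/3818-minimum-prefix-removal-to-make-array-strictly-increasing.py | minimumPrefixLength
-- ===== SOURCE A (Python) =====
-- from typing import List
--
-- def minimumPrefixLength(nums: List[int]) -> int:
--     n = len(nums)
--     if n <= 1:
--         return 0
--
--     good = [False] * n
--     good[-1] = True
--
--     for i in range(n - 2, -1, -1):
--         good[i] = good[i + 1] and nums[i] < nums[i + 1]
--
--     for i in range(n):
--         if good[i]:
--             return i
--
--     return n
-- ===== SOURCE B (Python) =====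
-- def minimumPrefixLength(nums):
--     n = len(nums)
--     if n <= 1:
--         return 0
--     i = n - 1
--     while i > 0 and nums[i - 1] < nums[i]:
--         i -= 1
--     return i
-- ===== Notes on version B (the rewrite author's own statement) =====
-- stated objective: simpler
-- what changed: Replaces the O(n)-space DP 'good' boolean table plus a second forward scan with a single backward walk that finds the start of the maximal strictly-increasing suffix directly.
import Mathlib
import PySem

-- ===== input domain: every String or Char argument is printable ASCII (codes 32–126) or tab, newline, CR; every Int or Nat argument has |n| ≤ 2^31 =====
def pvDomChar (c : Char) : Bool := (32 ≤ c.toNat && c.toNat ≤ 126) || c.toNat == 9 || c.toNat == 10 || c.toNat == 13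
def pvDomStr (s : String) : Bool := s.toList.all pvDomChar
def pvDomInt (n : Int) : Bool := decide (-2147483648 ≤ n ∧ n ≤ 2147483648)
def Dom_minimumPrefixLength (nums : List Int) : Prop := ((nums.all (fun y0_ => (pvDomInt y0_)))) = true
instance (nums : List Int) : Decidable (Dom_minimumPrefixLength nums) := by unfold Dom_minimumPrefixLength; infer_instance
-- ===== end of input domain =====

-- B replaces A's DP 'good' table + forward scan by one backward walk (simpler, O(1) extra space).

-- ===== PORT A =====
-- one loop body of `for i in range(n-2,-1,-1): good[i] = good[i+1] and nums[i] < nums[i+1]`;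
-- all indices are in range there, so getD is exact.
def aStep (nums : List Int) (g : List Bool) (i : Nat) : List Bool :=
  g.set i (g.getD (i + 1) false && decide (nums.getD i 0 < nums.getD (i + 1) 0))

def minimumPrefixLength (nums : List Int) : Int :=
  let n := nums.length
  if n ≤ 1 then 0
  else
    -- good = [False] * n; good[-1] = True   (negative index -1 = last slot, exact since n ≥ 2)
    let good0 := (List.replicate n false).set (n - 1) true
    -- range(n-2,-1,-1) = [n-2, …, 0] since n ≥ 2 here, exactly (List.range (n-1)).reverse
    let good := ((List.range (n - 1)).reverse).foldl (aStep nums) good0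
    -- for i in range(n): if good[i]: return i   … return n
    match (List.range n).findSome? (fun i => if good.getD i false then some (i : Int) else none) with
    | some i => i
    | none => (n : Int)

-- ===== PORT B =====
-- the backward while-loop `while i > 0 and nums[i-1] < nums[i]: i -= 1`; indices in range, getD exact.
def bWalk (nums : List Int) : Nat → Nat
  | 0 => 0
  | i + 1 => if nums.getD i 0 < nums.getD (i + 1) 0 then bWalk nums i else i + 1

def minimumPrefixLength_alt (nums : List Int) : Int :=
  if nums.length ≤ 1 then 0 else (bWalk nums (nums.length - 1) : Int)

-- ===== PRECONDITION & SPEC =====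
def Spec_minimumPrefixLength (nums : List Int) (out : Int) : Prop := out = minimumPrefixLength_alt nums
instance (nums : List Int) (out : Int) : Decidable (Spec_minimumPrefixLength nums out) := by unfold Spec_minimumPrefixLength; infer_instance

-- ===== CLAIM (what is proved, stated in full; the proofs are below) =====
def Claim_equal_minimumPrefixLength : Prop := ∀ (nums : List Int), Dom_minimumPrefixLength nums → Spec_minimumPrefixLength nums (minimumPrefixLength nums)

-- ===== LEMMAS AND PROOFS =====

-- `incList l` : l is strictly increasing
def incList : List Int → Bool
  | [] => true
  | [_] => true
  | a :: b :: t => decide (a < b) && incList (b :: t)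

-- `incB nums k` : the suffix of nums starting at k is strictly increasing
def incB (nums : List Int) (k : Nat) : Bool := incList (nums.drop k)

theorem incList_tail (a : Int) (l : List Int) (h : incList (a :: l) = true) : incList l = true := by
  cases l with
  | nil => rfl
  | cons b t => simp only [incList, Bool.and_eq_true] at h; exact h.2

theorem incB_of_ge (nums : List Int) (k : Nat) (h : nums.length ≤ k) : incB nums k = true := by
  simp [incB, List.drop_eq_nil_of_le h, incList]

theorem incB_last (nums : List Int) (k : Nat) (h : k + 1 = nums.length) : incB nums k = true := by
  have hlen : (nums.drop k).length = 1 := by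
    simp [List.length_drop]; omega
  obtain ⟨a, ha⟩ := List.length_eq_one_iff.mp hlen
  simp [incB, ha, incList]

theorem incB_succ_iff (nums : List Int) (k : Nat) (h : k + 1 < nums.length) :
    incB nums k = (decide (nums.getD k 0 < nums.getD (k + 1) 0) && incB nums (k + 1)) := by
  have hk : k < nums.length := by omega
  have h1 : nums.drop k = nums[k] :: nums.drop (k + 1) := List.drop_eq_getElem_cons hk
  have h2 : nums.drop (k + 1) = nums[k + 1] :: nums.drop (k + 2) := List.drop_eq_getElem_cons h
  rw [incB, incB, h1, h2, incList, ← h2]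
  simp [List.getD_eq_getElem?_getD, List.getElem?_eq_getElem hk, List.getElem?_eq_getElem h]

theorem incB_mono (nums : List Int) (k : Nat) (h : incB nums k = true) : incB nums (k + 1) = true := by
  by_cases hk : k < nums.length
  · have h1 : nums.drop k = nums[k] :: nums.drop (k + 1) := List.drop_eq_getElem_cons hk
    rw [incB, h1] at h
    exact incList_tail _ _ h
  · exact incB_of_ge nums (k + 1) (by omega)

theorem incB_le (nums : List Int) (j k : Nat) (hjk : j ≤ k) (h : incB nums j = true) :
    incB nums k = true := by
  induction k with
  | zero =>
    have : j = 0 := by omega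
    simpa [this] using h
  | succ m ih =>
    by_cases hm : j ≤ m
    · exact incB_mono nums m (ih hm)
    · have : j = m + 1 := by omega
      simpa [this] using h

-- the reversed-range foldl computes incB at every index
theorem fold_spec (nums : List Int) : ∀ (m : Nat) (g : List Bool), m < nums.length →
    g.length = nums.length →
    (∀ j, m ≤ j → j < nums.length → g.getD j false = incB nums j) →
    (∀ j, j < nums.length →
      (((List.range m).reverse).foldl (aStep nums) g).getD j false = incB nums j) := by
  intro m
  induction m with
  | zero =>
    intro g _ _ hg j hj; simpa using hg j (Nat.zero_le j) hj
  | succ m ih =>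
    intro g hm hlen hg j hj
    have hrev : (List.range (m + 1)).reverse = m :: (List.range m).reverse := by
      simp [List.range_succ]
    rw [hrev, List.foldl_cons]
    have hmn : m < nums.length := by omega
    have hset_len : (aStep nums g m).length = nums.length := by
      simp [aStep, hlen]
    have hset_vals : ∀ j', m ≤ j' → j' < nums.length → (aStep nums g m).getD j' false = incB nums j' := by
      intro j' hmj hjn
      by_cases hje : j' = m
      · have hlt : m < g.length := by omega
        have hstep : (aStep nums g m).getD m false =
            (g.getD (m + 1) false && decide (nums.getD m 0 < nums.getD (m + 1) 0)) := by
          simp [aStep, List.getD_eq_getElem?_getD, List.getElem?_set_eq_of_lt _ hlt]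
        rw [hje, hstep, hg (m + 1) (by omega) (by omega), incB_succ_iff nums m (by omega),
          Bool.and_comm]
      · have : (aStep nums g m).getD j' false = g.getD j' false := by
          simp [aStep, List.getD_eq_getElem?_getD, List.getElem?_set_ne (by omega : m ≠ j')]
        rw [this]; exact hg j' (by omega) hjn
    exact ih (aStep nums g m) hmn hset_len hset_vals j hj

-- first hit of a findSome? scan over range n
theorem findFirst_range : ∀ (n w : Nat) (q : Nat → Bool) (F : Nat → Int), w < n → q w = true →
    (∀ j, j < w → q j = false) →
    (List.range n).findSome? (fun i => if q i then some (F i) else none) = some (F w) := by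
  intro n
  induction n with
  | zero => intro w q F hw; omega
  | succ n ih =>
    intro w q F hw hq hlt
    rw [List.range_succ_eq_map, List.findSome?_cons]
    cases w with
    | zero => simp [hq]
    | succ v =>
      have h0 : q 0 = false := hlt 0 (by omega)
      simp only [h0, List.findSome?_map]
      have := ih v (fun i => q (i + 1)) (fun i => F (i + 1)) (by omega) hq
        (fun j hj => hlt (j + 1) (by omega))
      simpa [Function.comp] using this

theorem bWalk_le (nums : List Int) : ∀ i, bWalk nums i ≤ i := by
  intro i
  induction i with
  | zero => simp [bWalk]
  | succ m ih =>
    rw [bWalk]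
    split
    · omega
    · omega

theorem bWalk_inc (nums : List Int) : ∀ i, i < nums.length → incB nums i = true →
    incB nums (bWalk nums i) = true := by
  intro i
  induction i with
  | zero => intro _ h; simpa [bWalk] using h
  | succ m ih =>
    intro hm hinc
    rw [bWalk]
    split
    · rename_i hcmp
      apply ih (by omega)
      rw [incB_succ_iff nums m hm]
      simp only [hinc, Bool.and_true, decide_eq_true_eq]
      exact hcmp
    · exact hinc

theorem bWalk_first (nums : List Int) : ∀ i, i < nums.length → ∀ j, j < bWalk nums i →
    incB nums j = false := by
  intro i
  induction i with
  | zero => intro _ j hj; simp [bWalk] at hj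
  | succ m ih =>
    intro hm j hj
    rw [bWalk] at hj
    split at hj
    · exact ih (by omega) j hj
    · rename_i hcmp
      by_contra hne
      have hj' : incB nums j = true := by
        cases h : incB nums j with
        | false => exact absurd h hne
        | true => rfl
      have hm' : incB nums m = true := incB_le nums j m (by omega) hj'
      rw [incB_succ_iff nums m hm] at hm'
      simp only [Bool.and_eq_true, decide_eq_true_eq] at hm'
      exact hcmp hm'.1

-- ===== VERDICT (by name: the statement is the Claim_ definition above) =====
theorem minimumPrefixLength_spec : Claim_equal_minimumPrefixLength := by
  intro nums _
  unfold Spec_minimumPrefixLength minimumPrefixLength minimumPrefixLength_alt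
  by_cases hn : nums.length ≤ 1
  · simp [hn]
  · simp only [hn, if_false]
    have hn2 : 2 ≤ nums.length := by omega
    set n := nums.length with hndef
    set good0 := (List.replicate n false).set (n - 1) true with hg0
    have hg0len : good0.length = n := by simp [hg0]
    have hg0val : ∀ j, n - 1 ≤ j → j < n → good0.getD j false = incB nums j := by
      intro j h1 h2
      have hje : j = n - 1 := by omega
      have hlt : n - 1 < (List.replicate n (false : Bool)).length := by simp; omega
      rw [hje, incB_last nums (n - 1) (by omega), hg0]
      simp [List.getD_eq_getElem?_getD, List.getElem?_set_eq_of_lt _ hlt]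
    have hgood : ∀ j, j < n →
        (((List.range (n - 1)).reverse).foldl (aStep nums) good0).getD j false = incB nums j :=
      fold_spec nums (n - 1) good0 (by omega) hg0len hg0val
    set w := bWalk nums (n - 1) with hw
    have hwlt : w < n := by have := bWalk_le nums (n - 1); omega
    have hscan : (List.range n).findSome?
        (fun i => if (((List.range (n - 1)).reverse).foldl (aStep nums) good0).getD i false
          then some (i : Int) else none) = some (w : Int) := by
      apply findFirst_range n w
        (fun i => (((List.range (n - 1)).reverse).foldl (aStep nums) good0).getD i false)
        (fun i => (i : Int)) hwlt
      · rw [hgood w hwlt]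
        exact bWalk_inc nums (n - 1) (by omega) (incB_last nums (n - 1) (by omega))
      · intro j hj
        rw [hgood j (by omega)]
        exact bWalk_first nums (n - 1) (by omega) j hj
    simp only [hscan]
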